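-- pv_equiv track=rewrite | github.com/alsrudk/python_study | week07/괄호변환/kjg.py | recurse
-- ===== SOURCE A (Python) =====
-- from collections import deque
--
-- def check(u):
--     word = []
--     que = deque(u)
--     i = 0
--     while i<len(u):
--         if que[0] == ')':
--             if word and word[-1] == '(':
--                 word.pop()
--                 que.popleft()
--             else:
--                 break
--         else:
--             word.append(que.popleft())
--         i+=1
--     if que:
--         return False
--     else:
--         return True
--
-- def recurse(p):
--     if p == '':
--         return p
--     else:
--         u,v = '',''
--         l_num,r_num = 0,0
--         i = 0
--         for p_ in p:
--             if l_num == 0 or l_num!=r_num: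
--                 u += p_
--                 if p_ == '(':
--                     l_num += 1
--                 else:
--                     r_num += 1
--             else:
--                 v+=p_
--         if check(u) == True:
--             return u + recurse(v)
--         else:
--             w = '('+recurse(v)+')'
--             u = u[1:-1]
--             for i in u:
--                 if i == '(':
--                     w += ')'
--                 else:
--                     w += '('
--             return w
-- ===== SOURCE B (Python) =====
-- from collections import deque
--
--
-- def _valid(b):
--     # stack run: a ')' must find a '(' on top of the stack of pushed chars
--     stack = []
--     for c in b:
--         if c == ')':
--             if stack and stack[-1]:
--                 stack.pop()
--             else:
--                 return False
--         else:
--             stack.append(c == '(')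
--     return True
--
--
-- def recurse(p):
--     # pass 1: split p once into minimal balanced-count blocks
--     blocks = []
--     cur = []
--     bal = 0
--     for c in p:
--         cur.append(c)
--         bal += 1 if c == '(' else -1
--         if bal == 0:
--             blocks.append(''.join(cur))
--             cur = []
--     if cur:
--         blocks.append(''.join(cur))
--     # pass 2: fold the blocks back-to-front with a deque of pieces
--     parts = deque()
--     for b in reversed(blocks):
--         if _valid(b):
--             parts.appendleft(b)
--         else:
--             parts.append(')')
--             parts.append(''.join(')' if c == '(' else '(' for c in b[1:-1]))
--             parts.appendleft('(')
--     return ''.join(parts)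
-- ===== Notes on version B (the rewrite author's own statement) =====
-- stated objective: faster
-- what changed: B replaces A's recursive descent (rebuild u and v char by char, rescan u with check, recurse on v) by two non-recursive staged passes: one linear scan cuts p into all minimal balanced-count blocks at once, then a single back-to-front fold over the blocks assembles the answer in a deque of pieces joined once.
import Mathlib
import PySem

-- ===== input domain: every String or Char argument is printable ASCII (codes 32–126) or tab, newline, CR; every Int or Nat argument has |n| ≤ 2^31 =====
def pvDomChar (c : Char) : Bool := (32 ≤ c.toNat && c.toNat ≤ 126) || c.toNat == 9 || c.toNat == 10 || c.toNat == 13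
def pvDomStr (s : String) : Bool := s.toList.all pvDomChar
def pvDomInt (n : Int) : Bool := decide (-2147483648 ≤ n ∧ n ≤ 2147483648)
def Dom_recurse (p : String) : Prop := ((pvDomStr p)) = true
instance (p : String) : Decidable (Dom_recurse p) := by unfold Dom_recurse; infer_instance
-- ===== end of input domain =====

-- B: two non-recursive staged passes (one block-splitting scan, then a back-to-front fold
-- over the blocks with a deque of pieces) instead of A's recursive descent; objective: faster.


-- ===== PORT A =====
-- check's while loop: word (Python list, here head = Python word[-1]), que (deque), i counts processed chars
def checkLoop (word : List Char) (que : List Char) (i : Nat) (len : Nat) : List Char :=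
  if i < len then
    match que with
    | [] => que            -- unreachable: que always holds len - i chars
    | c :: rest =>
      if c = ')' then
        if word ≠ [] ∧ word.headD ' ' = '(' then checkLoop word.tail rest (i + 1) len
        else que           -- break
      else checkLoop (c :: word) rest (i + 1) len
  else que
termination_by structural que

-- Python's `if que: return False / else: return True`
def check (u : List Char) : Bool := (checkLoop [] u 0 u.length).isEmpty

-- the for-loop of recurse building u, v, l_num, r_num (state in that order)
def splitA : List Char → List Char → List Char → Int → Int → List Char × List Char
  | [], u, v, _, _ => (u, v)
  | c :: rest, u, v, l, r =>
    if l = 0 ∨ l ≠ r then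
      if c = '(' then splitA rest (u ++ [c]) v (l + 1) r
      else splitA rest (u ++ [c]) v l (r + 1)
    else splitA rest u (v ++ [c]) l r

-- accumulator independence of splitA (used below and for the termination of recurseA)
theorem splitA_acc (rest : List Char) (u v : List Char) (l r : Int) :
    splitA rest u v l r = (u ++ (splitA rest [] [] l r).1, v ++ (splitA rest [] [] l r).2) := by
  induction rest generalizing u v l r with
  | nil => simp [splitA]
  | cons c cs ih =>
    simp only [splitA, List.nil_append]
    split
    · split <;> (rw [ih (u ++ [c]) v, ih [c] []]; simp)
    · rw [ih u (v ++ [c]), ih [] [c]]; simp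

theorem splitA_len (rest : List Char) (l r : Int) :
    (splitA rest [] [] l r).1.length + (splitA rest [] [] l r).2.length = rest.length := by
  induction rest generalizing l r with
  | nil => simp [splitA]
  | cons c cs ih =>
    simp only [splitA, List.nil_append]
    split
    · split
      · rw [splitA_acc cs [c] []]; have := ih (l + 1) r; simp; omega
      · rw [splitA_acc cs [c] []]; have := ih l (r + 1); simp; omega
    · rw [splitA_acc cs [] [c]]; have := ih l r; simp; omega

theorem splitA_snd_lt (p : List Char) (h : p ≠ []) :
    (splitA p [] [] 0 0).2.length < p.length := by
  match p with
  | c :: cs =>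
    have h1 : splitA (c :: cs) [] [] 0 0 = splitA cs [c] [] (if c = '(' then 1 else 0) (if c = '(' then 0 else 1) := by
      by_cases hc : c = '(' <;> simp [splitA, hc]
    have h2 := splitA_acc cs [c] [] (if c = '(' then 1 else 0) (if c = '(' then 0 else 1)
    have h3 := splitA_len cs (if c = '(' then 1 else 0) (if c = '(' then 0 else 1)
    rw [h1, h2]
    simp only [List.nil_append, List.length_cons]
    omega

def recurseA (p : List Char) : List Char :=
  if h : p = [] then p
  else
    if check (splitA p [] [] 0 0).1 then
      (splitA p [] [] 0 0).1 ++ recurseA (splitA p [] [] 0 0).2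
    else
      -- w = '(' + recurse(v) + ')', then one flipped char of u[1:-1] appended per iteration
      (PySem.List.slice (splitA p [] [] 0 0).1 (some 1) (some (-1))).foldl
        (fun w i => w ++ [if i = '(' then ')' else '('])
        ('(' :: recurseA (splitA p [] [] 0 0).2 ++ [')'])
termination_by p.length
decreasing_by all_goals exact splitA_snd_lt p h

def recurse (p : String) : String := String.ofList (recurseA p.toList)

-- ===== PORT B =====
-- Source B's _valid: stack of booleans (True for a pushed '('), head = Python stack[-1]
def validB : List Char → List Bool → Bool
  | [], _ => true
  | c :: rest, stack =>
    if c = ')' then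
      if stack ≠ [] ∧ stack.headD false then validB rest stack.tail
      else false
    else validB rest ((c == '(') :: stack)

-- Source B pass 1: the for-loop with state (cur, bal, blocks); returns final (cur, blocks)
def blocksLoop : List Char → List Char → Int → List (List Char) → List Char × List (List Char)
  | [], cur, _, blocks => (cur, blocks)
  | c :: rest, cur, bal, blocks =>
    let cur' := cur ++ [c]
    let bal' := if c = '(' then bal + 1 else bal - 1
    if bal' = 0 then blocksLoop rest [] bal' (blocks ++ [cur'])
    else blocksLoop rest cur' bal' blocks

-- Source B pass 1 incl. the trailing `if cur: blocks.append(...)`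
def blocksB (p : List Char) : List (List Char) :=
  let (cur, blocks) := blocksLoop p [] 0 []
  if cur ≠ [] then blocks ++ [cur] else blocks

-- ''.join(')' if c == '(' else '(' for c in b[1:-1])
def flipMid (b : List Char) : List Char :=
  (PySem.List.slice b (some 1) (some (-1))).map (fun c => if c = '(' then ')' else '(')

-- Source B pass 2, one iteration: parts is the deque (a list of pieces)
def stepB (parts : List (List Char)) (b : List Char) : List (List Char) :=
  if validB b [] then b :: parts
  else ['('] :: (parts ++ [[')'], flipMid b])

def recurse_alt (p : String) : String :=
  String.ofList (((blocksB p.toList).reverse.foldl stepB []).flatten)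

-- ===== PRECONDITION & SPEC =====
def Spec_recurse (p : String) (out : String) : Prop := out = recurse_alt p
instance (p : String) (out : String) : Decidable (Spec_recurse p out) := by unfold Spec_recurse; infer_instance

-- ===== CLAIM (what is proved, stated in full; the proofs are below) =====
def Claim_equal_recurse : Prop := ∀ (p : String), Dom_recurse p → Spec_recurse p (recurse p)

-- ===== LEMMAS AND PROOFS =====

-- check's stack machine as one fold step (some word = not broken yet)
def wordStep : Option (List Char) → Char → Option (List Char)
  | none, _ => none
  | some w, c =>
    if c = ')' then (if w ≠ [] ∧ w.headD ' ' = '(' then some w.tail else none)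
    else some (c :: w)

theorem foldl_wordStep_none (u : List Char) : u.foldl wordStep none = none := by
  induction u with
  | nil => rfl
  | cons c cs ih => simpa [wordStep] using ih

theorem checkLoop_eq_foldl (que : List Char) : ∀ (word : List Char) (i len : Nat),
    i + que.length = len →
    (checkLoop word que i len).isEmpty = (que.foldl wordStep (some word)).isSome := by
  induction que with
  | nil => intro word i len h; rw [checkLoop]; simp at h; simp [h]
  | cons c cs ih =>
    intro word i len h
    rw [checkLoop]
    have hlt : i < len := by simp at h; omega
    rw [if_pos hlt]
    have hlen : i + 1 + cs.length = len := by simp at h; omega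
    have hws : wordStep (some word) c =
        (if c = ')' then (if word ≠ [] ∧ word.headD ' ' = '(' then some word.tail else none)
         else some (c :: word)) := rfl
    by_cases hc : c = ')'
    · rw [if_pos hc]
      by_cases hw : word ≠ [] ∧ word.headD ' ' = '('
      · rw [if_pos hw, ih word.tail (i + 1) len hlen, List.foldl_cons, hws, if_pos hc, if_pos hw]
      · rw [if_neg hw, List.foldl_cons, hws, if_pos hc, if_neg hw, foldl_wordStep_none]
        simp
    · rw [if_neg hc, ih (c :: word) (i + 1) len hlen, List.foldl_cons, hws, if_neg hc]

theorem check_eq_foldl (u : List Char) :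
    check u = (u.foldl wordStep (some [])).isSome := by
  unfold check
  exact checkLoop_eq_foldl u [] 0 u.length (by simp)

-- B's boolean stack simulates check's char stack
theorem validB_eq_foldl (u : List Char) : ∀ (w : List Char),
    validB u (w.map (· == '(')) = (u.foldl wordStep (some w)).isSome := by
  induction u with
  | nil => intro w; rfl
  | cons c cs ih =>
    intro w
    have hws : wordStep (some w) c =
        (if c = ')' then (if w ≠ [] ∧ w.headD ' ' = '(' then some w.tail else none)
         else some (c :: w)) := rfl
    by_cases hc : c = ')'
    · by_cases hw : w ≠ [] ∧ w.headD ' ' = '('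
      · have hcond : (w.map (· == '(')) ≠ [] ∧ (w.map (· == '(')).headD false = true := by
          rcases w with _ | ⟨w0, w'⟩
          · exact absurd rfl hw.1
          · exact ⟨by simp, by simpa using hw.2⟩
        have htail : (w.map (· == '(')).tail = w.tail.map (· == '(') := by
          cases w <;> simp
        rw [validB, if_pos hc, if_pos hcond, htail, ih w.tail,
            List.foldl_cons, hws, if_pos hc, if_pos hw]
      · have hcond : ¬ ((w.map (· == '(')) ≠ [] ∧ (w.map (· == '(')).headD false = true) := by
          rcases w with _ | ⟨w0, w'⟩
          · simp
          · simp only [ne_eq, not_and] at hw ⊢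
            intro _
            simp only [List.map_cons, List.headD_cons, beq_iff_eq]
            intro h0
            exact (hw (by simp)) (by simpa using h0)
        rw [validB, if_pos hc, if_neg hcond, List.foldl_cons, hws, if_pos hc, if_neg hw,
            foldl_wordStep_none]
        rfl
    · have : (c == '(') :: w.map (· == '(') = (c :: w).map (· == '(') := by simp
      rw [validB, if_neg hc, this, ih (c :: w), List.foldl_cons, hws, if_neg hc]

theorem validB_eq_check (u : List Char) : validB u [] = check u := by
  rw [check_eq_foldl]
  exact validB_eq_foldl u []

-- A's recursion seen through its block structure
def blocksOf (p : List Char) : List (List Char) :=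
  if h : p = [] then []
  else (splitA p [] [] 0 0).1 :: blocksOf (splitA p [] [] 0 0).2
termination_by p.length
decreasing_by exact splitA_snd_lt p h

-- running balance of a block (the quantity Source B's bal tracks)
def balInt (u : List Char) : Int :=
  u.foldl (fun b c => if c = '(' then b + 1 else b - 1) 0

theorem balInt_cons (c : Char) (u : List Char) :
    balInt (c :: u) = (if c = '(' then 1 else -1) + balInt u := by
  unfold balInt
  rw [List.foldl_cons]
  have : ∀ (xs : List Char) (a b : Int),
      xs.foldl (fun b c => if c = '(' then b + 1 else b - 1) (a + b)
        = a + xs.foldl (fun b c => if c = '(' then b + 1 else b - 1) b := by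
    intro xs
    induction xs with
    | nil => intro a b; rfl
    | cons x xs ih =>
      intro a b
      simp only [List.foldl_cons]
      split <;> [rw [show a + b + 1 = a + (b + 1) by ring, ih];
                 rw [show a + b - 1 = a + (b - 1) by ring, ih]]
  by_cases hc : c = '(' <;> simp only [hc, if_pos, if_neg, reduceIte] <;>
    [rw [show (0:Int) + 1 = 1 + 0 by ring, this]; rw [show (0:Int) - 1 = -1 + 0 by ring, this]]

-- once balanced (l = r ≠ 0), everything goes to v
theorem splitA_phase2 (rest : List Char) (u v : List Char) (l r : Int)
    (h0 : l ≠ 0) (heq : l = r) : splitA rest u v l r = (u, v ++ rest) := by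
  induction rest generalizing v with
  | nil => simp [splitA]
  | cons c cs ih =>
    simp only [splitA]
    rw [if_neg (by omega)]
    rw [ih (v ++ [c])]
    simp

-- MAIN pass-1 correspondence: one blocksLoop run from an in-block state (counters l, r)
-- either cuts exactly where splitA cuts, or consumes everything without a cut (v = [])
theorem blocksLoop_corr (rest : List Char) : ∀ (cur : List Char) (l r : Int)
    (blocks : List (List Char)), 0 ≤ l → 0 ≤ r → (l = 0 ∨ l ≠ r) → rest ≠ [] →
    (blocksLoop rest cur (l - r) blocks =
      (if l - r + balInt (splitA rest [] [] l r).1 = 0 then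
        blocksLoop (splitA rest [] [] l r).2 [] 0
          (blocks ++ [cur ++ (splitA rest [] [] l r).1])
      else (cur ++ (splitA rest [] [] l r).1, blocks)))
    ∧ (l - r + balInt (splitA rest [] [] l r).1 ≠ 0 → (splitA rest [] [] l r).2 = []) := by
  induction rest with
  | nil => intro cur l r blocks _ _ _ hne; exact absurd rfl hne
  | cons c rest' ih =>
    intro cur l r blocks hl hr hphase _
    have hsplit : splitA (c :: rest') [] [] l r
        = splitA rest' [c] [] (if c = '(' then l + 1 else l) (if c = '(' then r else r + 1) := by
      simp only [splitA, List.nil_append, if_pos hphase]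
      by_cases hc : c = '(' <;> simp [hc]
    set l' := if c = '(' then l + 1 else l with hl'
    set r' := if c = '(' then r else r + 1 with hr'
    have hbal : (if c = '(' then l - r + 1 else l - r - 1) = l' - r' := by
      by_cases hc : c = '(' <;> simp [hl', hr', hc] <;> ring
    have hloop : blocksLoop (c :: rest') cur (l - r) blocks =
        (if l' - r' = 0 then blocksLoop rest' [] (l' - r') (blocks ++ [cur ++ [c]])
         else blocksLoop rest' (cur ++ [c]) (l' - r') blocks) := by
      simp only [blocksLoop, hbal]
    by_cases hz : l' - r' = 0
    · -- cut after c: u = [c], v = rest'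
      have hl'pos : l' ≠ 0 := by by_cases hc : c = '(' <;> simp [hl', hr', hc] at hz ⊢ <;> omega
      have hphase2 : splitA rest' [c] [] l' r' = ([c], rest') :=
        splitA_phase2 rest' [c] [] l' r' hl'pos (by omega)
      rw [hsplit, hphase2]
      have hbc : l - r + balInt [c] = 0 := by
        by_cases hc : c = '(' <;> simp [balInt, hc] <;>
          simp [hl', hr', hc] at hz <;> omega
      constructor
      · rw [hloop, if_pos hz, if_pos hbc, hz]
      · intro hcontra; exact absurd hbc hcontra
    · -- no cut yet
      rcases rest' with _ | ⟨d, rest''⟩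
      · -- rest' = []: u = [c], v = []
        rw [hsplit]
        simp only [splitA]
        have hbc : l - r + balInt [c] ≠ 0 := by
          by_cases hc : c = '(' <;> simp [balInt, hc] <;>
            simp [hl', hr', hc] at hz <;> omega
        constructor
        · rw [hloop, if_neg hz, if_neg hbc]
          rfl
        · intro _; trivial
      · have hl'0 : 0 ≤ l' := by by_cases hc : c = '(' <;> simp [hl', hr', hc] <;> omega
        have hr'0 : 0 ≤ r' := by by_cases hc : c = '(' <;> simp [hl', hr', hc] <;> omega
        have hph' : l' = 0 ∨ l' ≠ r' := Or.inr (by omega)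
        obtain ⟨ih1, ih2⟩ := ih (cur ++ [c]) l' r' blocks hl'0 hr'0 hph' (by simp)
        have hacc := splitA_acc (d :: rest'') [c] [] l' r'
        rw [hsplit, hacc]
        simp only [List.nil_append]
        have hbalc : balInt ([c] ++ (splitA (d :: rest'') [] [] l' r').1)
            = (if c = '(' then 1 else -1) + balInt (splitA (d :: rest'') [] [] l' r').1 := by
          rw [List.singleton_append, balInt_cons]
        have hlr : l - r + ((if c = '(' then (1:Int) else -1)
              + balInt (splitA (d :: rest'') [] [] l' r').1)
            = l' - r' + balInt (splitA (d :: rest'') [] [] l' r').1 := by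
          by_cases hc : c = '(' <;> simp [hl', hr', hc] <;> ring
        constructor
        · rw [hloop, if_neg hz, ih1, hbalc, hlr]
          by_cases hcut : l' - r' + balInt (splitA (d :: rest'') [] [] l' r').1 = 0
          · rw [if_pos hcut, if_pos hcut]
            simp
          · rw [if_neg hcut, if_neg hcut]
            simp
        · intro hne
          rw [hbalc, hlr] at hne
          exact ih2 hne

-- `if cur: blocks.append(''.join(cur))` applied to the loop's final state
def finishB (s : List Char × List (List Char)) : List (List Char) :=
  if s.1 ≠ [] then s.2 ++ [s.1] else s.2

theorem splitA_fst_ne (c : Char) (cs : List Char) :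
    (splitA (c :: cs) [] [] 0 0).1 ≠ [] := by
  have h1 : splitA (c :: cs) [] [] 0 0
      = splitA cs [c] [] (if c = '(' then 1 else 0) (if c = '(' then 0 else 1) := by
    by_cases hc : c = '(' <;> simp [splitA, hc]
  rw [h1, splitA_acc]
  simp

-- pass 1 computes exactly A's block decomposition
theorem finishB_blocksLoop (n : Nat) : ∀ (p : List Char), p.length ≤ n →
    ∀ (blocks : List (List Char)),
    finishB (blocksLoop p [] 0 blocks) = blocks ++ blocksOf p := by
  induction n with
  | zero =>
    intro p hp blocks
    have : p = [] := List.length_eq_zero_iff.mp (Nat.le_zero.mp hp)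
    subst this
    rw [blocksOf]
    simp [blocksLoop, finishB]
  | succ n ihn =>
    intro p hp blocks
    rcases hne : p with _ | ⟨c, cs⟩
    · rw [blocksOf]; simp [blocksLoop, finishB]
    · obtain ⟨h1, h2⟩ := blocksLoop_corr (c :: cs) [] 0 0 blocks le_rfl le_rfl (Or.inl rfl)
        (by simp)
      simp only [show (0:Int) - 0 = 0 from rfl, zero_add, List.nil_append] at h1 h2
      rw [h1]
      have hvlen : (splitA (c :: cs) [] [] 0 0).2.length ≤ n := by
        have h3 := splitA_snd_lt (c :: cs) (by simp)
        rw [hne] at hp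
        simp only [List.length_cons] at h3 hp
        omega
      rw [blocksOf, dif_neg (by simp : ¬ (c :: cs) = [])]
      by_cases hcut : balInt (splitA (c :: cs) [] [] 0 0).1 = 0
      · rw [if_pos hcut, ihn _ hvlen]
        simp
      · rw [if_neg hcut]
        rw [h2 hcut]
        rw [show blocksOf ([] : List Char) = [] from by rw [blocksOf]; simp]
        simp [finishB, splitA_fst_ne c cs]

theorem blocksB_eq_blocksOf (p : List Char) : blocksB p = blocksOf p := by
  have := finishB_blocksLoop p.length p le_rfl []
  simpa [blocksB, finishB] using this

-- A's result as a fold over the blocks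
def blocksR : List (List Char) → List Char
  | [] => []
  | b :: bs => if check b then b ++ blocksR bs else ['('] ++ blocksR bs ++ [')'] ++ flipMid b

theorem recurseA_eq_blocksR (n : Nat) : ∀ (p : List Char), p.length ≤ n →
    recurseA p = blocksR (blocksOf p) := by
  induction n with
  | zero =>
    intro p hp
    have : p = [] := List.length_eq_zero_iff.mp (Nat.le_zero.mp hp)
    subst this
    rw [blocksOf, recurseA]
    simp [blocksR]
  | succ n ihn =>
    intro p hp
    by_cases hne : p = []
    · subst hne; rw [blocksOf, recurseA]; simp [blocksR]
    · have hvlen : (splitA p [] [] 0 0).2.length ≤ n := by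
        have := splitA_snd_lt p hne
        have : (splitA p [] [] 0 0).2.length < p.length := this
        omega
      rw [recurseA, dif_neg hne, blocksOf, dif_neg hne]
      by_cases hch : check (splitA p [] [] 0 0).1
      · rw [if_pos hch, blocksR, if_pos hch, ihn _ hvlen]
      · rw [if_neg hch, blocksR, if_neg hch, ihn _ hvlen]
        rw [PySem.List.foldl_append_singleton_eq_map]
        simp [flipMid, List.append_assoc]

-- pass 2 (the reversed fold with the deque) computes blocksR
theorem foldl_stepB_eq_blocksR (bs : List (List Char)) :
    (bs.reverse.foldl stepB []).flatten = blocksR bs := by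
  induction bs with
  | nil => rfl
  | cons b bs ih =>
    rw [List.reverse_cons, List.foldl_append, List.foldl_cons, List.foldl_nil]
    have hstep : ∀ (parts : List (List Char)) (bb : List Char),
        stepB parts bb = if check bb then bb :: parts else ['('] :: (parts ++ [[')'], flipMid bb]) := by
      intro parts bb
      unfold stepB
      rw [validB_eq_check]
    rw [hstep]
    by_cases hch : check b
    · rw [if_pos hch, blocksR, if_pos hch, List.flatten_cons, ih]
    · rw [if_neg hch, blocksR, if_neg hch, List.flatten_cons, List.flatten_append, ih]
      simp [List.append_assoc]

-- ===== VERDICT (by name: the statement is the Claim_ definition above) =====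
theorem recurse_spec : Claim_equal_recurse := by
  intro p _
  unfold Spec_recurse recurse recurse_alt
  rw [blocksB_eq_blocksOf, foldl_stepB_eq_blocksR,
      ← recurseA_eq_blocksR p.toList.length p.toList le_rfl]
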